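-- pv_equiv track=rewrite | github.com/Pritz69/GFG_POTD | Maximum_Diamonds.py | maxDiamonds
-- ===== SOURCE A (Python) =====
-- import heapq
--
-- def maxDiamonds(A, N, K):
--     # code here
--     h=[]
--     c=0
--     for x in A :
--         heapq.heappush(h,-x)
--     while K != 0 :
--         v= -1 * (heapq.heappop(h))
--         c += v
--         heapq.heappush(h,-(v//2))
--         K -=1
--     return c
-- ===== SOURCE B (Python) =====
-- def maxDiamonds(A, N, K):
--     lst = list(A)
--     total = 0
--     for _ in range(K):
--         m = max(lst)
--         total += m
--         lst[lst.index(m)] = m // 2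
--     return total
-- ===== Notes on version B (the rewrite author's own statement) =====
-- stated objective: simpler
-- what changed: Replaces the negated min-heap (heappush/heappop) by a flat mutable list with a linear max-scan per extraction: each of the K steps takes the current maximum and overwrites it in place with its floor half.
import Mathlib
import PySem

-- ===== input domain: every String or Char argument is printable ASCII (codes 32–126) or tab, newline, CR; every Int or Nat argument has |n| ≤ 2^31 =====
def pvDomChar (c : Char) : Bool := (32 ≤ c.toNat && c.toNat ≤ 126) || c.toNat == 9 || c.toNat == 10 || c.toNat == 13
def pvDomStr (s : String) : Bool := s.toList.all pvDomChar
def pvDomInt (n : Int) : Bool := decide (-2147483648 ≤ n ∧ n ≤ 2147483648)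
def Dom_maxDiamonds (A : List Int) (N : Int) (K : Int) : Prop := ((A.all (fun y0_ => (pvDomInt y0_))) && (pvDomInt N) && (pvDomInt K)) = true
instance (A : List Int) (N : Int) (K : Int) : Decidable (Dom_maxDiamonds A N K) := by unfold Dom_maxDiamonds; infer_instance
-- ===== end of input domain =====

-- B replaces A's negated min-heap by a flat list with a linear max-scan per extraction
-- (objective: simpler); equal return values are proved on Pre_ below.

-- ===== PORT A =====
-- A-side helpers: a transliteration of heapq's heappush/heappop (CPython _siftdown/_siftup).
-- hget i = heap[i]; exact because every index these routines read is in range.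
def hget (h : List Int) (i : Nat) : Int := h.getD i 0

def siftdownLoop (h : List Int) (startpos pos : Nat) (newitem : Int) : List Int × Nat :=
  if _hp : startpos < pos then
    let parentpos := (pos - 1) / 2
    let parent := hget h parentpos
    if newitem < parent then
      siftdownLoop (h.set pos parent) startpos parentpos newitem
    else (h, pos)
  else (h, pos)
termination_by pos
decreasing_by omega

def siftdown (h : List Int) (startpos pos : Nat) : List Int :=
  let newitem := hget h pos
  let r := siftdownLoop h startpos pos newitem
  r.1.set r.2 newitem

def heappush (h : List Int) (item : Int) : List Int :=
  let h := h ++ [item]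
  siftdown h 0 (h.length - 1)

def siftupLoop (h : List Int) (pos childpos : Nat) : List Int × Nat :=
  if _hc : childpos < h.length then
    let cp := if childpos + 1 < h.length ∧ ¬ (hget h childpos < hget h (childpos + 1)) then
                childpos + 1 else childpos
    siftupLoop (h.set pos (hget h cp)) cp (2 * cp + 1)
  else (h, pos)
termination_by h.length - childpos
decreasing_by simp only [List.length_set]; split <;> omega

def siftup (h : List Int) (pos : Nat) : List Int :=
  let startpos := pos
  let newitem := hget h pos
  let r := siftupLoop h pos (2 * pos + 1)
  siftdown (r.1.set r.2 newitem) startpos r.2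

def heappop (h : List Int) : Int × List Int :=
  if h.isEmpty then (0, [])
  else
    let lastelt := hget h (h.length - 1)
    let rest := h.dropLast
    if rest.isEmpty then (lastelt, rest)
    else (hget rest 0, siftup (rest.set 0 lastelt) 0)

def aLoop : Nat → List Int → Int → Int
  | 0, _, c => c
  | k + 1, h, c =>
      let p := heappop h
      let v := -1 * p.1
      aLoop k (heappush p.2 (-(PySem.Int.floordiv v 2))) (c + v)

def maxDiamonds (A : List Int) (N : Int) (K : Int) : Int :=
  let h := A.foldl (fun h x => heappush h (-x)) []
  aLoop K.toNat h 0


-- ===== PORT B =====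
def bLoop : Nat → List Int → Int → Int
  | 0, _, total => total
  | k + 1, lst, total =>
      match PySem.List.max? lst (fun x => x) with
      | none => total
      | some m =>
          let lst' := match PySem.List.index? lst m with
                      | some i => lst.set i (PySem.Int.floordiv m 2)
                      | none => lst
          bLoop k lst' (total + m)

def maxDiamonds_alt (A : List Int) (N : Int) (K : Int) : Int :=
  bLoop K.toNat A 0


-- ===== PRECONDITION & SPEC =====
-- Pre_ excludes K < 0 (A's `while K != 0` with `K -= 1` never terminates) and
-- A = [] with K ≠ 0 (heappop, resp. B's max(), raises on the empty list).
def Pre_maxDiamonds (A : List Int) (N : Int) (K : Int) : Prop := 0 ≤ K ∧ (K = 0 ∨ A ≠ [])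
instance (A : List Int) (N : Int) (K : Int) : Decidable (Pre_maxDiamonds A N K) := by
  unfold Pre_maxDiamonds; infer_instance

def pvWitness_maxDiamonds : List Int × Int × Int := ([5, 2, 9], 3, 4)

def Spec_maxDiamonds (A : List Int) (N : Int) (K : Int) (out : Int) : Prop :=
  out = maxDiamonds_alt A N K
instance (A : List Int) (N : Int) (K : Int) (out : Int) : Decidable (Spec_maxDiamonds A N K out) := by
  unfold Spec_maxDiamonds; infer_instance

-- ===== CLAIM (what is proved, stated in full; the proofs are below) =====
def Claim_equal_maxDiamonds : Prop := ∀ (A : List Int) (N : Int) (K : Int),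
  Dom_maxDiamonds A N K → Pre_maxDiamonds A N K → Spec_maxDiamonds A N K (maxDiamonds A N K)

-- ===== LEMMAS AND PROOFS =====

def IsHeap (h : List Int) : Prop :=
  ∀ c : Nat, 0 < c → c < h.length → hget h ((c - 1) / 2) ≤ hget h c

theorem hget_eq (h : List Int) (i : Nat) (hi : i < h.length) : hget h i = h[i] := by
  simp [hget, List.getD_eq_getElem?_getD, List.getElem?_eq_getElem hi]

theorem hget_set_self (h : List Int) (i : Nat) (v : Int) (hi : i < h.length) :
    hget (h.set i v) i = v := by
  simp [hget, List.getD_eq_getElem?_getD, hi]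

theorem hget_set_ne (h : List Int) (i j : Nat) (v : Int) (hij : i ≠ j) :
    hget (h.set i v) j = hget h j := by
  simp [hget, List.getD_eq_getElem?_getD, List.getElem?_set_ne hij]

theorem mset_set (l : List Int) (i : Nat) (v : Int) (hi : i < l.length) :
    (↑(l.set i v) : Multiset Int) + {hget l i} = ↑l + {v} := by
  induction l generalizing i with
  | nil => simp at hi
  | cons x t ih =>
    cases i with
    | zero =>
      simp only [List.set, hget, List.getD_cons_zero, ← Multiset.cons_coe]
      rw [← Multiset.singleton_add, ← Multiset.singleton_add]
      abel
    | succ n =>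
      simp only [List.set, hget, List.getD_cons_succ, ← Multiset.cons_coe]
      rw [← Multiset.singleton_add, ← Multiset.singleton_add, add_assoc, add_assoc,
        show ((↑(t.set n v) : Multiset Int) + {t.getD n 0}) = ↑t + {v} from ih n (by simpa using hi)]

theorem isHeap_root_le (h : List Int) (hh : IsHeap h) :
    ∀ c, c < h.length → hget h 0 ≤ hget h c := by
  intro c
  induction c using Nat.strong_induction_on with
  | _ c IH =>
    intro hc
    rcases Nat.eq_zero_or_pos c with h0 | h0
    · subst h0; exact le_refl _
    · exact le_trans (IH ((c-1)/2) (by omega) (by omega)) (hh c h0 hc)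
theorem siftdownLoop_base (h : List Int) (ni : Int) :
    siftdownLoop h 0 0 ni = (h, 0) := by rw [siftdownLoop]; simp

theorem siftdownLoop_step (h : List Int) (pos : Nat) (ni : Int) (hp : 0 < pos) :
    siftdownLoop h 0 pos ni =
      if ni < hget h ((pos - 1) / 2) then
        siftdownLoop (h.set pos (hget h ((pos - 1) / 2))) 0 ((pos - 1) / 2) ni
      else (h, pos) := by
  rw [siftdownLoop]; simp [hp]

theorem siftdownLoop_spec (ni : Int) :
    ∀ (pos : Nat) (h : List Int), pos < h.length →
    (∀ c, 0 < c → c < h.length → c ≠ pos → hget h ((c - 1) / 2) ≤ hget h c) →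
    (∀ c, c < h.length → (c - 1) / 2 = pos → 0 < c → ni ≤ hget h c) →
    (∀ c, c < h.length → (c - 1) / 2 = pos → 0 < c → 0 < pos →
        hget h ((pos - 1) / 2) ≤ hget h c) →
    IsHeap (((siftdownLoop h 0 pos ni).1).set (siftdownLoop h 0 pos ni).2 ni) ∧
    (↑(((siftdownLoop h 0 pos ni).1).set (siftdownLoop h 0 pos ni).2 ni) : Multiset Int)
        = ↑(h.set pos ni) ∧
    (siftdownLoop h 0 pos ni).1.length = h.length ∧
    (siftdownLoop h 0 pos ni).2 < h.length := by
  intro pos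
  induction pos using Nat.strong_induction_on with
  | _ pos IH =>
    intro h hpos hA hB hB2
    rcases Nat.eq_zero_or_pos pos with h0 | h0
    · subst h0
      rw [siftdownLoop_base]
      refine ⟨?_, rfl, rfl, hpos⟩
      intro c hc hclen
      rw [List.length_set] at hclen
      rw [hget_set_ne h 0 c ni (by omega)]
      by_cases hpc : (c - 1) / 2 = 0
      · rw [hpc, hget_set_self h 0 ni hpos]
        exact hB c hclen hpc hc
      · rw [hget_set_ne h 0 _ ni (by omega)]
        exact hA c hc hclen (by omega)
    · set pp := (pos - 1) / 2 with hppdef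
      have hpplt : pp < pos := by omega
      rw [siftdownLoop_step h pos ni h0]
      by_cases hlt : ni < hget h pp
      · rw [if_pos hlt]
        set parent := hget h pp with hpar
        set h' := h.set pos parent with hh'
        have hlen' : h'.length = h.length := by simp [hh']
        have hgp : ∀ j, j ≠ pos → hget h' j = hget h j := by
          intro j hj; exact hget_set_ne h pos j parent (fun e => hj e.symm)
        have hgpos : hget h' pos = parent := hget_set_self h pos parent hpos
        have IH' := IH pp hpplt h' (by omega)
          (by -- hA'
            intro c hc hclen hcpp
            rw [hlen'] at hclen
            by_cases hcp : c = pos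
            · subst hcp
              rw [show (c - 1) / 2 = pp from rfl, hgp pp (by omega), hgpos]
            · rw [hgp c hcp]
              by_cases hpc : (c - 1) / 2 = pos
              · rw [hpc, hgpos]
                exact hB2 c hclen hpc hc h0
              · rw [hgp _ hpc]
                exact hA c hc hclen hcp)
          (by -- hB'
            intro c hclen hcpp hc
            rw [hlen'] at hclen
            by_cases hcp : c = pos
            · subst hcp; rw [hgpos]; exact le_of_lt hlt
            · rw [hgp c hcp]
              refine le_trans (le_of_lt hlt) ?_
              rw [hpar, ← hcpp]; exact hA c hc hclen hcp)
          (by -- hB2'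
            intro c hclen hcpp hc hpp0
            rw [hlen'] at hclen
            have hgplt : (pp - 1) / 2 < pp := by omega
            rw [hgp ((pp - 1) / 2) (by omega)]
            have hedge : hget h ((pp - 1) / 2) ≤ hget h pp :=
              hA pp hpp0 (by omega) (by omega)
            by_cases hcp : c = pos
            · subst hcp; rw [hgpos]; exact hedge
            · rw [hgp c hcp]
              refine le_trans hedge ?_
              rw [← hcpp]; exact hA c hc hclen hcp)
        obtain ⟨ih1, ih2, ih3, ih4⟩ := IH'
        refine ⟨ih1, ?_, by rwa [hlen'] at ih3, by rwa [hlen'] at ih4⟩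
        rw [ih2]
        -- multiset juggling
        have e1 : (↑(h'.set pp ni) : Multiset Int) + {hget h' pp} = ↑h' + {ni} :=
          mset_set h' pp ni (by omega)
        rw [hgp pp (by omega), ← hpar] at e1
        have e2 : (↑h' : Multiset Int) + {hget h pos} = ↑h + {parent} :=
          mset_set h pos parent hpos
        have e3 : (↑(h.set pos ni) : Multiset Int) + {hget h pos} = ↑h + {ni} :=
          mset_set h pos ni hpos
        have key : (↑(h'.set pp ni) : Multiset Int) + ({parent} + {hget h pos})
            = ↑(h.set pos ni) + ({parent} + {hget h pos}) := by
          calc (↑(h'.set pp ni) : Multiset Int) + ({parent} + {hget h pos})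
              = ((↑(h'.set pp ni) : Multiset Int) + {parent}) + {hget h pos} := by abel
            _ = (↑h' + {ni}) + {hget h pos} := by rw [e1]
            _ = (↑h' + {hget h pos}) + {ni} := by abel
            _ = (↑h + {parent}) + {ni} := by rw [e2]
            _ = (↑h + {ni}) + {parent} := by abel
            _ = (↑(h.set pos ni) + {hget h pos}) + {parent} := by rw [e3]
            _ = ↑(h.set pos ni) + ({parent} + {hget h pos}) := by abel
        exact add_right_cancel key
      · rw [if_neg hlt]
        refine ⟨?_, rfl, rfl, hpos⟩
        intro c hc hclen
        rw [List.length_set] at hclen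
        by_cases hcp : c = pos
        · subst hcp
          rw [hget_set_self h c ni hpos, hget_set_ne h c _ ni (by omega)]
          exact le_of_not_gt (by simpa using hlt)
        · rw [hget_set_ne h pos c ni (fun e => hcp e.symm)]
          by_cases hpc : (c - 1) / 2 = pos
          · rw [hpc, hget_set_self h pos ni hpos]
            exact hB c hclen hpc hc
          · rw [hget_set_ne h pos _ ni (fun e => hpc e.symm)]
            exact hA c hc hclen hcp
theorem mset_set_self (h : List Int) (i : Nat) (hi : i < h.length) :
    (↑(h.set i (hget h i)) : Multiset Int) = ↑h :=
  add_right_cancel (mset_set h i (hget h i) hi)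

theorem mset_double_set (h : List Int) (pos q : Nat) (w : Int)
    (hpos : pos < h.length) (hq : q < h.length) (hne : q ≠ pos) :
    (↑((h.set pos (hget h q)).set q w) : Multiset Int) = ↑(h.set pos w) := by
  set b := hget h q with hb
  set h' := h.set pos b with hh'
  have e1 : (↑(h'.set q w) : Multiset Int) + {hget h' q} = ↑h' + {w} :=
    mset_set h' q w (by simp [hh', hq])
  rw [hget_set_ne h pos q b (fun e => hne e.symm), ← hb] at e1
  have e2 : (↑h' : Multiset Int) + {hget h pos} = ↑h + {b} := mset_set h pos b hpos
  have e3 : (↑(h.set pos w) : Multiset Int) + {hget h pos} = ↑h + {w} :=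
    mset_set h pos w hpos
  have key : (↑(h'.set q w) : Multiset Int) + ({b} + {hget h pos})
      = ↑(h.set pos w) + ({b} + {hget h pos}) := by
    calc (↑(h'.set q w) : Multiset Int) + ({b} + {hget h pos})
        = ((↑(h'.set q w) : Multiset Int) + {b}) + {hget h pos} := by abel
      _ = (↑h' + {w}) + {hget h pos} := by rw [e1]
      _ = (↑h' + {hget h pos}) + {w} := by abel
      _ = (↑h + {b}) + {w} := by rw [e2]
      _ = (↑h + {w}) + {b} := by abel
      _ = (↑(h.set pos w) + {hget h pos}) + {b} := by rw [e3]
      _ = ↑(h.set pos w) + ({b} + {hget h pos}) := by abel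
  exact add_right_cancel key

theorem siftdown_spec (h : List Int) (pos : Nat) (hpos : pos < h.length)
    (hleaf : h.length ≤ 2 * pos + 1)
    (hA : ∀ c, 0 < c → c < h.length → c ≠ pos → hget h ((c - 1) / 2) ≤ hget h c) :
    IsHeap (siftdown h 0 pos) ∧ (↑(siftdown h 0 pos) : Multiset Int) = ↑h ∧
    (siftdown h 0 pos).length = h.length := by
  obtain ⟨i1, i2, i3, i4⟩ := siftdownLoop_spec (hget h pos) pos h hpos hA
    (fun c hcl hcp hc => absurd hcl (by omega))
    (fun c hcl hcp hc _ => absurd hcl (by omega))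
  refine ⟨i1, ?_, ?_⟩
  · show (↑((siftdownLoop h 0 pos (hget h pos)).1.set
      (siftdownLoop h 0 pos (hget h pos)).2 (hget h pos)) : Multiset Int) = ↑h
    rw [i2, mset_set_self h pos hpos]
  · show ((siftdownLoop h 0 pos (hget h pos)).1.set
      (siftdownLoop h 0 pos (hget h pos)).2 (hget h pos)).length = h.length
    simp [i3]

theorem hget_append (h : List Int) (x : Int) (j : Nat) (hj : j < h.length) :
    hget (h ++ [x]) j = hget h j := by
  rw [hget_eq _ _ (by simp; omega), hget_eq _ _ hj, List.getElem_append_left hj]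

theorem heappush_spec (h : List Int) (x : Int) (hh : IsHeap h) :
    IsHeap (heappush h x) ∧ (↑(heappush h x) : Multiset Int) = ↑h + {x} ∧
    (heappush h x).length = h.length + 1 := by
  have hlen : (h ++ [x]).length = h.length + 1 := by simp
  have epush : heappush h x = siftdown (h ++ [x]) 0 h.length := by
    show siftdown (h ++ [x]) 0 ((h ++ [x]).length - 1) = _
    rw [hlen]
    norm_num
  obtain ⟨i1, i2, i3⟩ := siftdown_spec (h ++ [x]) h.length (by omega) (by omega)
    (fun c hc hcl hcp => by
      rw [hlen] at hcl
      have hc2 : c < h.length := by omega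
      rw [hget_append h x _ (by omega), hget_append h x _ hc2]
      exact hh c hc hc2)
  rw [epush]
  refine ⟨i1, ?_, by omega⟩
  rw [i2, ← Multiset.coe_add, Multiset.coe_singleton]
theorem siftupLoop_stop (h : List Int) (pos childpos : Nat) (hc : ¬ childpos < h.length) :
    siftupLoop h pos childpos = (h, pos) := by rw [siftupLoop]; simp [hc]

theorem siftupLoop_step (h : List Int) (pos childpos : Nat) (hc : childpos < h.length) :
    siftupLoop h pos childpos =
      siftupLoop (h.set pos (hget h (if childpos + 1 < h.length ∧
          ¬ (hget h childpos < hget h (childpos + 1)) then childpos + 1 else childpos)))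
        (if childpos + 1 < h.length ∧ ¬ (hget h childpos < hget h (childpos + 1)) then
          childpos + 1 else childpos)
        (2 * (if childpos + 1 < h.length ∧ ¬ (hget h childpos < hget h (childpos + 1)) then
          childpos + 1 else childpos) + 1) := by
  rw [siftupLoop]; simp [hc]

theorem siftupLoop_spec :
    ∀ (n : Nat) (h : List Int) (pos : Nat), h.length - (2 * pos + 1) ≤ n → pos < h.length →
    (∀ c, 0 < c → c < h.length → (c - 1) / 2 ≠ pos → c ≠ pos →
        hget h ((c - 1) / 2) ≤ hget h c) →
    (∀ c, c < h.length → (c - 1) / 2 = pos → 0 < pos → hget h ((pos - 1) / 2) ≤ hget h c) →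
    (siftupLoop h pos (2 * pos + 1)).1.length = h.length ∧
    (siftupLoop h pos (2 * pos + 1)).2 < h.length ∧
    h.length ≤ 2 * (siftupLoop h pos (2 * pos + 1)).2 + 1 ∧
    (∀ c, 0 < c → c < h.length → c ≠ (siftupLoop h pos (2 * pos + 1)).2 →
        hget (siftupLoop h pos (2 * pos + 1)).1 ((c - 1) / 2)
          ≤ hget (siftupLoop h pos (2 * pos + 1)).1 c) ∧
    (∀ w : Int, (↑((siftupLoop h pos (2 * pos + 1)).1.set
        (siftupLoop h pos (2 * pos + 1)).2 w) : Multiset Int) = ↑(h.set pos w)) := by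
  intro n
  induction n with
  | zero =>
    intro h pos hn hpos hA hC
    have hstop : ¬ 2 * pos + 1 < h.length := by omega
    rw [siftupLoop_stop h pos _ hstop]
    exact ⟨rfl, hpos, by omega,
      fun c hc hcl hcp => hA c hc hcl (by omega) hcp, fun w => rfl⟩
  | succ n IHn =>
    intro h pos hn hpos hA hC
    by_cases hc : 2 * pos + 1 < h.length
    · rw [siftupLoop_step h pos _ hc]
      set cp := if 2 * pos + 1 + 1 < h.length ∧
          ¬ (hget h (2 * pos + 1) < hget h (2 * pos + 1 + 1)) then 2 * pos + 1 + 1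
        else 2 * pos + 1 with hcpdef
      have hcp_cases : cp = 2 * pos + 1 ∨ cp = 2 * pos + 2 := by
        rw [hcpdef]; split <;> omega
      have hcplt : cp < h.length := by
        rw [hcpdef]; split
        · omega
        · exact hc
      have hcppos : pos < cp := by omega
      have hcpchild : (cp - 1) / 2 = pos := by omega
      have hmin : ∀ c, c < h.length → (c - 1) / 2 = pos → 0 < c → hget h cp ≤ hget h c := by
        intro c hcl hcc hc0
        have hc12 : c = 2 * pos + 1 ∨ c = 2 * pos + 2 := by omega
        rw [hcpdef]; split
        · rename_i hcond
          rcases hc12 with rfl | rfl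
          · exact le_of_not_gt (by simpa using hcond.2)
          · exact le_refl _
        · rename_i hcond
          rcases hc12 with rfl | rfl
          · exact le_refl _
          · have : hget h (2 * pos + 1) < hget h (2 * pos + 1 + 1) := by
              by_contra hnot
              exact hcond ⟨by omega, hnot⟩
            exact le_of_lt this
      set h' := h.set pos (hget h cp) with hh'
      have hlen' : h'.length = h.length := by simp [hh']
      have hgp : ∀ j, j ≠ pos → hget h' j = hget h j :=
        fun j hj => hget_set_ne h pos j _ (fun e => hj e.symm)
      have hgpos : hget h' pos = hget h cp := hget_set_self h pos _ hpos
      obtain ⟨i1, i2, i3, i4, i5⟩ := IHn h' cp (by omega) (by omega)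
        (by -- hA'
          intro c hc0 hcl hcpar hcne
          rw [hlen'] at hcl
          by_cases hce : c = pos
          · subst hce
            rw [hgp ((c - 1) / 2) (by omega), hgpos]
            exact hC cp hcplt hcpchild hc0
          · rw [hgp c hce]
            by_cases hpe : (c - 1) / 2 = pos
            · rw [hpe, hgpos]
              exact hmin c hcl hpe hc0
            · rw [hgp _ hpe]
              exact hA c hc0 hcl hpe hce)
        (by -- hC'
          intro c hcl hcpar hcp0
          rw [hlen'] at hcl
          rw [hcpchild, hgpos, hgp c (by omega), ← hcpar]
          exact hA c (by omega) hcl (by omega) (by omega))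
      rw [hlen'] at i1 i2 i3 i4
      refine ⟨i1, i2, i3, i4, ?_⟩
      intro w
      rw [i5 w]
      exact mset_double_set h pos cp w hpos hcplt (by omega)
    · rw [siftupLoop_stop h pos _ hc]
      exact ⟨rfl, hpos, by omega,
        fun c hc0 hcl hcp => hA c hc0 hcl (by omega) hcp, fun w => rfl⟩

theorem siftup_spec (h : List Int) (h0 : 0 < h.length)
    (hA : ∀ c, 0 < c → c < h.length → (c - 1) / 2 ≠ 0 → hget h ((c - 1) / 2) ≤ hget h c) :
    IsHeap (siftup h 0) ∧ (↑(siftup h 0) : Multiset Int) = ↑h ∧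
    (siftup h 0).length = h.length := by
  obtain ⟨i1, i2, i3, i4, i5⟩ := siftupLoop_spec h.length h 0 (by omega) h0
    (fun c hc0 hcl hpar _ => hA c hc0 hcl hpar)
    (fun c hcl hpar hpos0 => absurd hpos0 (by omega))
  set r := siftupLoop h 0 (2 * 0 + 1) with hr
  set ni := hget h 0 with hni
  have esift : siftup h 0 = siftdown (r.1.set r.2 ni) 0 r.2 := rfl
  set g := r.1.set r.2 ni with hg
  have hglen : g.length = h.length := by simp [hg, i1]
  obtain ⟨j1, j2, j3⟩ := siftdown_spec g r.2 (by omega) (by omega)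
    (by
      intro c hc0 hcl hcne
      rw [hglen] at hcl
      have hparne : (c - 1) / 2 ≠ r.2 := by omega
      rw [hg, hget_set_ne _ _ _ _ (fun e => hparne e.symm),
        hget_set_ne _ _ _ _ (fun e => hcne e.symm)]
      exact i4 c hc0 (by omega) hcne)
  rw [esift]
  refine ⟨j1, ?_, by omega⟩
  rw [j2, hg, i5 ni, hni, mset_set_self h 0 h0]

theorem hget_dropLast (h : List Int) (c : Nat) (hc : c < h.length - 1) :
    hget h.dropLast c = hget h c := by
  rw [hget_eq _ _ (by simp; omega), hget_eq _ _ (by omega), List.getElem_dropLast]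

theorem heappop_spec (h : List Int) (hh : IsHeap h) (hne : h ≠ []) :
    (heappop h).1 = hget h 0 ∧ IsHeap (heappop h).2 ∧
    ((↑(heappop h).2 : Multiset Int) + {hget h 0} = ↑h) ∧
    (heappop h).2.length = h.length - 1 := by
  have hlen0 : 0 < h.length := List.length_pos_iff.mpr hne
  have hemp : h.isEmpty = false := by simpa [List.isEmpty_iff]
  rcases Nat.lt_or_ge h.length 2 with hsmall | hbig
  · have h1 : h.length = 1 := by omega
    obtain ⟨a, rfl⟩ := List.length_eq_one_iff.mp h1
    refine ⟨rfl, ?_, ?_, rfl⟩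
    · intro c hc hcl
      rw [show (heappop [a]).2 = [] from rfl] at hcl
      simp at hcl
    · show (↑([] : List Int) : Multiset Int) + {hget [a] 0} = ↑([a] : List Int)
      simp [hget]
  · have hrlen : h.dropLast.length = h.length - 1 := by simp
    have hremp : h.dropLast.isEmpty = false := by
      simp [← List.length_pos_iff]; omega
    have epop : heappop h = (hget h.dropLast 0,
        siftup (h.dropLast.set 0 (hget h (h.length - 1))) 0) := by
      simp only [heappop, hemp, hremp, Bool.false_eq_true, if_false]
    set lastelt := hget h (h.length - 1) with hle
    set g := h.dropLast.set 0 lastelt with hg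
    have hglen : g.length = h.length - 1 := by simp [hg, hrlen]
    obtain ⟨j1, j2, j3⟩ := siftup_spec g (by omega)
      (by
        intro c hc0 hcl hpar
        rw [hg, hget_set_ne _ _ _ _ (fun e => hpar e.symm),
          hget_set_ne _ _ _ _ (by omega)]
        rw [hglen] at hcl
        rw [hget_dropLast h _ (by omega), hget_dropLast h _ (by omega)]
        exact hh c hc0 (by omega))
    have hr0 : hget h.dropLast 0 = hget h 0 := hget_dropLast h 0 (by omega)
    rw [epop]
    refine ⟨hr0, j1, ?_, by show (siftup g 0).length = h.length - 1; omega⟩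
    rw [j2]
    have e1 : (↑g : Multiset Int) + {hget h.dropLast 0} = ↑h.dropLast + {lastelt} :=
      mset_set h.dropLast 0 lastelt (by omega)
    rw [hr0] at e1
    rw [e1]
    have : h.dropLast ++ [h.getLast hne] = h := List.dropLast_append_getLast hne
    calc (↑h.dropLast : Multiset Int) + {lastelt}
        = ↑(h.dropLast ++ [lastelt]) := by rw [← Multiset.coe_add, Multiset.coe_singleton]
      _ = ↑h := by
          rw [show lastelt = h.getLast hne from by
            rw [hle, hget_eq h _ (by omega), List.getLast_eq_getElem]]
          rw [this]
theorem isHeap_nil : IsHeap [] := by intro c hc hcl; simp at hcl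

theorem build_spec (A : List Int) :
    ∀ (h : List Int), IsHeap h →
    IsHeap (A.foldl (fun h x => heappush h (-x)) h) ∧
    (↑(A.foldl (fun h x => heappush h (-x)) h) : Multiset Int)
      = ↑h + ↑(A.map (fun x => -x)) := by
  induction A with
  | nil => intro h hh; exact ⟨hh, by simp⟩
  | cons a t ih =>
    intro h hh
    obtain ⟨p1, p2, _⟩ := heappush_spec h (-a) hh
    obtain ⟨q1, q2⟩ := ih (heappush h (-a)) p1
    refine ⟨q1, ?_⟩
    simp only [List.foldl_cons, List.map_cons]
    rw [q2, p2, ← Multiset.cons_coe, ← Multiset.singleton_add, add_assoc]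

theorem loop_eq :
    ∀ (fuel : Nat) (h l : List Int) (c : Int),
    IsHeap h → (↑h : Multiset Int) = ↑(l.map (fun x => -x)) → l ≠ [] →
    aLoop fuel h c = bLoop fuel l c := by
  intro fuel
  induction fuel with
  | zero => intro h l c _ _ _; rfl
  | succ k ih =>
    intro h l c hh hml hlne
    obtain ⟨m, hm⟩ : ∃ m, PySem.List.max? l (fun x => x) = some m := by
      cases e : PySem.List.max? l (fun x => x) with
      | none => exact absurd ((PySem.List.max?_eq_none_iff _ _).mp e) hlne
      | some m => exact ⟨m, rfl⟩
    have hmmem : m ∈ l := PySem.List.max?_mem hm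
    have hmmax : ∀ y ∈ l, y ≤ m := PySem.List.max?_isMax hm
    have hlenh : h.length = l.length := by
      have := congrArg Multiset.card hml
      simpa using this
    have hhne : h ≠ [] := by
      intro e
      subst e
      simp at hlenh
      exact hlne (List.eq_nil_of_length_eq_zero hlenh.symm)
    have hlen0 : 0 < h.length := List.length_pos_iff.mpr hhne
    have hmem_iff : ∀ a : Int, a ∈ h ↔ a ∈ l.map (fun x => -x) := by
      intro a
      rw [← Multiset.mem_coe, hml, Multiset.mem_coe]
    have hroot_mem : hget h 0 ∈ h := by
      rw [hget_eq h 0 hlen0]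
      exact List.getElem_mem _
    have hub : -m ≤ hget h 0 := by
      obtain ⟨y, hy, hya⟩ := List.mem_map.mp ((hmem_iff _).mp hroot_mem)
      rw [← hya]
      exact neg_le_neg (hmmax y hy)
    have hlb : hget h 0 ≤ -m := by
      have hmh : (-m) ∈ h := (hmem_iff _).mpr (List.mem_map.mpr ⟨m, hmmem, rfl⟩)
      obtain ⟨i, hil, hie⟩ := List.mem_iff_getElem.mp hmh
      rw [← hie, ← hget_eq h i hil]
      exact isHeap_root_le h hh i hil
    have hroot : hget h 0 = -m := le_antisymm hlb hub
    obtain ⟨p1, p2, p3, p4⟩ := heappop_spec h hh hhne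
    obtain ⟨i, hi⟩ : ∃ i, PySem.List.index? l m = some i := by
      cases e : PySem.List.index? l m with
      | none => exact absurd ((PySem.List.index?_eq_none_iff _ _).mp e) (by simpa using hmmem)
      | some j => exact ⟨j, rfl⟩
    obtain ⟨hilt, hie, -⟩ := PySem.List.getElem_of_index?_eq_some hi
    have eA : aLoop (k + 1) h c =
        aLoop k (heappush (heappop h).2 (-(PySem.Int.floordiv (-1 * (heappop h).1) 2)))
          (c + -1 * (heappop h).1) := rfl
    have eB : bLoop (k + 1) l c = bLoop k (l.set i (PySem.Int.floordiv m 2)) (c + m) := by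
      show (match PySem.List.max? l (fun x => x) with
        | none => c
        | some m =>
            bLoop k (match PySem.List.index? l m with
              | some i => l.set i (PySem.Int.floordiv m 2)
              | none => l) (c + m)) = _
      rw [hm]
      show bLoop k (match PySem.List.index? l m with
        | some i => l.set i (PySem.Int.floordiv m 2)
        | none => l) (c + m) = _
      rw [hi]
    rw [eA, eB, p1, hroot, show (-1 : Int) * -m = m from by ring]
    set w := -(PySem.Int.floordiv m 2) with hw
    obtain ⟨q1, q2, q3⟩ := heappush_spec (heappop h).2 w p2
    rw [hroot] at p3
    apply ih _ _ _ q1 ?_ ?_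
    · set l' := l.set i (PySem.Int.floordiv m 2) with hl'
      have emap : l'.map (fun x => -x) = (l.map (fun x => -x)).set i w := by
        rw [hl', List.map_set]
      have hmlen : i < (l.map (fun x => -x)).length := by simpa using hilt
      have e1 : (↑((l.map (fun x => -x)).set i w) : Multiset Int)
          + {hget (l.map (fun x => -x)) i} = ↑(l.map (fun x => -x)) + {w} :=
        mset_set _ i w hmlen
      have hgi : hget (l.map (fun x => -x)) i = -m := by
        rw [hget_eq _ i hmlen]
        simp [hie]
      rw [hgi] at e1
      have key : (↑(heappush (heappop h).2 w) : Multiset Int) + {-m}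
          = ↑(l'.map (fun x => -x)) + {-m} := by
        calc (↑(heappush (heappop h).2 w) : Multiset Int) + {-m}
            = (↑(heappop h).2 + {w}) + {-m} := by rw [q2]
          _ = (↑(heappop h).2 + {-m}) + {w} := by abel
          _ = ↑h + {w} := by rw [p3]
          _ = ↑(l.map (fun x => -x)) + {w} := by rw [hml]
          _ = ↑((l.map (fun x => -x)).set i w) + {-m} := by rw [e1]
          _ = ↑(l'.map (fun x => -x)) + {-m} := by rw [emap]
      exact add_right_cancel key
    · intro e
      apply hlne
      have := congrArg List.length e
      simp at this
      exact this

-- ===== VERDICT (by name: the statement is the Claim_ definition above) =====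
theorem maxDiamonds_spec : Claim_equal_maxDiamonds := by
  intro A N K hdom hpre
  unfold Spec_maxDiamonds
  obtain ⟨hk, hA⟩ := hpre
  show aLoop K.toNat (A.foldl (fun h x => heappush h (-x)) []) 0 = bLoop K.toNat A 0
  rcases hA with hK0 | hAne
  · subst hK0; rfl
  · obtain ⟨b1, b2⟩ := build_spec A [] isHeap_nil
    exact loop_eq K.toNat _ A 0 b1 (by simpa using b2) hAne
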